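-- pv_equiv track=rewrite | github.com/VincentDekkers/TheiQgame | main.py | generatedatausedpieces
-- ===== SOURCE A (Python) =====
-- def generatedatausedpieces(grid, usedpieces):
--     datausedpieces = []
--     for usedpiece in usedpieces:
--         found = False
--         for i in range(11):
--             if found:
--                 break
--             for j in range(5):
--                 if grid[j][i] == usedpiece:
--                     found = True
--                     datausedpieces.append([i,j,0])
--                     break
--     return datausedpieces
-- ===== SOURCE B (Python) =====
-- def generatedatausedpieces(grid, usedpieces):
--     remaining = set(usedpieces)
--     pos = {}
--     for i in range(11):
--         if not remaining:
--             break
--         for j in range(5):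
--             if not remaining:
--                 break
--             v = grid[j][i]
--             if v in remaining:
--                 remaining.discard(v)
--                 pos[v] = [i, j, 0]
--     return [pos[p] for p in usedpieces if p in pos]
-- ===== Notes on version B (the rewrite author's own statement) =====
-- stated objective: alternative
-- what changed: Instead of rescanning the grid column-major for every used piece, B makes one column-major scan that stops once every distinct used piece has been located, building a dict from piece value to its first [i,j,0], then answers each used piece by a single dict lookup (skipping absent pieces).
import Mathlib
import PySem

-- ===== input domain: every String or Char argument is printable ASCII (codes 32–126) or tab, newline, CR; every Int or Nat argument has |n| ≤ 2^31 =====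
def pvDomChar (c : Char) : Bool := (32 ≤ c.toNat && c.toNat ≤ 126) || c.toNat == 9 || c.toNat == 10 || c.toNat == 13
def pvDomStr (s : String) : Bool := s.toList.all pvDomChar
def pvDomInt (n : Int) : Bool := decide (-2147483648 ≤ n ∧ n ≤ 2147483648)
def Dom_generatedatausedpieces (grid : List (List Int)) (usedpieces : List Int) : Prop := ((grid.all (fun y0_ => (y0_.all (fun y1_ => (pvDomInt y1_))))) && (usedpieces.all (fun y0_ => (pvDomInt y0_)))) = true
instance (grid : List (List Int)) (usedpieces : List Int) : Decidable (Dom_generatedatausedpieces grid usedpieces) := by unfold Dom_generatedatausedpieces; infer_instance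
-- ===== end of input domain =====

-- B replaces A's per-piece rescans of the grid by one bounds-checked index-building scan plus dict lookups.

-- grid[j][i], total form (in range on every access A actually performs inside Pre_)
def pvCell (grid : List (List Int)) (j i : Int) : Int :=
  PySem.List.pyGetD (PySem.List.pyGetD grid j []) i 0

-- ===== PORT A =====
def generatedatausedpieces (grid : List (List Int)) (usedpieces : List Int) : List (List Int) :=
  usedpieces.foldl (fun acc usedpiece =>
    ((PySem.List.pyRange 0 11 1).foldl (fun (st : Bool × List (List Int)) i =>
      if st.1 then st        -- 'if found: break'
      else
        match (PySem.List.pyRange 0 5 1).foldl (fun (r : Option Int) j =>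
          if r.isSome then r  -- inner 'break'
          else if pvCell grid j i = usedpiece then some j else r) none with
        | some j => (true, st.2 ++ [[i, j, 0]])
        | none => st) (false, acc)).2) []

-- ===== PORT B =====
def generatedatausedpieces_alt (grid : List (List Int)) (usedpieces : List Int) : List (List Int) :=
  let st := (PySem.List.pyRange 0 11 1).foldl (fun (st : PySem.Set Int × PySem.Dict Int (List Int)) i =>
    if st.1 = [] then st      -- 'if not remaining: break'
    else (PySem.List.pyRange 0 5 1).foldl (fun (st : PySem.Set Int × PySem.Dict Int (List Int)) j =>
      if st.1 = [] then st    -- 'if not remaining: break'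
      else
        let v := pvCell grid j i
        if PySem.Set.contains st.1 v then (PySem.Set.discard st.1 v, st.2.insert v [i, j, 0])
        else st) st) (PySem.Set.ofList usedpieces, PySem.Dict.empty)
  usedpieces.filterMap (fun p => st.2.get? p)

-- ===== PRECONDITION & SPEC =====
-- first event of the column-major scan in column i for piece p:
-- some false = an out-of-range probe, some true = a matching cell, none = neither in this column
def pvColEvent (grid : List (List Int)) (p i : Int) : Option Bool :=
  (PySem.List.pyRange 0 5 1).findSome? (fun j =>
    if j < PySem.List.len grid ∧ i < PySem.List.len (PySem.List.pyGetD grid j []) then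
      (if pvCell grid j i = p then some true else none)
    else some false)

-- A's scan for piece p stops safely: its first event (match or missing cell) is a match, or the
-- whole 11x5 region exists
def pvStops (grid : List (List Int)) (p : Int) : Bool :=
  match (PySem.List.pyRange 0 11 1).findSome? (fun i => pvColEvent grid p i) with
  | some b => b
  | none => true

-- Pre_ is exactly where the Python A returns: for every used piece the scan finds its match
-- before reaching any out-of-range cell (A raises IndexError otherwise)
def Pre_generatedatausedpieces (grid : List (List Int)) (usedpieces : List Int) : Prop :=
  ∀ p ∈ usedpieces, pvStops grid p = true
instance (grid : List (List Int)) (usedpieces : List Int) : Decidable (Pre_generatedatausedpieces grid usedpieces) := by unfold Pre_generatedatausedpieces; infer_instance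
def pvWitness_generatedatausedpieces : List (List Int) × List Int :=
  ([[0,0,0,0,0,0,0,0,0,0,0],[0,0,0,0,0,0,0,0,0,0,0],[0,0,0,0,0,0,0,0,0,0,0],
    [0,0,0,0,0,0,0,0,0,0,0],[0,0,0,0,0,0,0,0,0,0,1]], [1, 2])

def Spec_generatedatausedpieces (grid : List (List Int)) (usedpieces : List Int) (out : List (List Int)) : Prop := out = generatedatausedpieces_alt grid usedpieces
instance (grid : List (List Int)) (usedpieces : List Int) (out : List (List Int)) : Decidable (Spec_generatedatausedpieces grid usedpieces out) := by unfold Spec_generatedatausedpieces; infer_instance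

-- ===== CLAIM (what is proved, stated in full; the proofs are below) =====
def Claim_equal_generatedatausedpieces : Prop := ∀ (grid : List (List Int)) (usedpieces : List Int), Dom_generatedatausedpieces grid usedpieces → Pre_generatedatausedpieces grid usedpieces → Spec_generatedatausedpieces grid usedpieces (generatedatausedpieces grid usedpieces)

-- ===== LEMMAS AND PROOFS =====

-- A's answer per piece: first totalized cell equal to p in column-major order
def pvFind (grid : List (List Int)) (p : Int) : Option (List Int) :=
  (PySem.List.pyRange 0 11 1).findSome? (fun i =>
    (PySem.List.pyRange 0 5 1).findSome? (fun j =>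
      if pvCell grid j i = p then some [i, j, 0] else none))

lemma foldl_break {α : Type} (C : α → Prop) [DecidablePred C] :
    ∀ (L : List α) (r : Option α),
      L.foldl (fun r x => if r.isSome then r else if C x then some x else r) r
        = r.or (L.findSome? fun x => if C x then some x else none) := by
  intro L
  induction L with
  | nil => intro r; cases r <;> simp
  | cons x L ih =>
    intro r
    cases r with
    | some a => simp [List.foldl_cons, ih]
    | none =>
      by_cases hx : C x <;>
        simp [List.foldl_cons, hx, ih]

lemma findSome?_if_map {α γ : Type} (L : List α) (C : α → Prop)
    [DecidablePred C] (g : α → γ) :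
    (L.findSome? (fun x => if C x then some x else none)).map g
      = L.findSome? (fun x => if C x then some (g x) else none) := by
  induction L with
  | nil => simp
  | cons x L ih => by_cases hx : C x <;> simp [hx, ih]

lemma a_outer_keep (grid : List (List Int)) (p : Int) :
    ∀ (L : List Int) (acc : List (List Int)),
      L.foldl (fun (st : Bool × List (List Int)) i =>
        if st.1 then st
        else
          match (PySem.List.pyRange 0 5 1).foldl (fun (r : Option Int) j =>
            if r.isSome then r
            else if pvCell grid j i = p then some j else r) none with
          | some j => (true, st.2 ++ [[i, j, 0]])
          | none => st) (true, acc) = (true, acc) := by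
  intro L
  induction L with
  | nil => intro acc; rfl
  | cons x L ih => intro acc; simpa using ih acc

lemma a_outer (grid : List (List Int)) (p : Int) :
    ∀ (L : List Int) (acc : List (List Int)),
      (L.foldl (fun (st : Bool × List (List Int)) i =>
        if st.1 then st
        else
          match (PySem.List.pyRange 0 5 1).foldl (fun (r : Option Int) j =>
            if r.isSome then r
            else if pvCell grid j i = p then some j else r) none with
          | some j => (true, st.2 ++ [[i, j, 0]])
          | none => st) (false, acc)).2
      = acc ++ (L.findSome? (fun i =>
          (PySem.List.pyRange 0 5 1).findSome? (fun j =>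
            if pvCell grid j i = p then some [i, j, 0] else none))).toList := by
  intro L
  induction L with
  | nil => intro acc; simp
  | cons x L ih =>
    intro acc
    have hinner := foldl_break (fun j => pvCell grid j x = p) (PySem.List.pyRange 0 5 1) none
    simp only [Option.none_or] at hinner
    simp only [List.foldl_cons, Bool.false_eq_true, if_false, hinner, List.findSome?_cons]
    have hmap := findSome?_if_map (PySem.List.pyRange 0 5 1)
      (fun j => pvCell grid j x = p) (fun j => ([x, j, 0] : List Int))
    cases hj : (PySem.List.pyRange 0 5 1).findSome? (fun j =>
        if pvCell grid j x = p then some j else none) with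
    | some j =>
      have hm : (PySem.List.pyRange 0 5 1).findSome? (fun j =>
          if pvCell grid j x = p then some [x, j, 0] else none) = some [x, j, 0] := by
        rw [← hmap, hj]; rfl
      simp [a_outer_keep, hm]
    | none =>
      have hm : (PySem.List.pyRange 0 5 1).findSome? (fun j =>
          if pvCell grid j x = p then some [x, j, 0] else none) = none := by
        rw [← hmap, hj]; rfl
      simp [ih, hm]

lemma a_eq_filterMap (grid : List (List Int)) :
    ∀ (ps : List Int) (acc : List (List Int)),
      ps.foldl (fun acc p => acc ++ (pvFind grid p).toList) acc
        = acc ++ ps.filterMap (pvFind grid) := by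
  intro ps
  induction ps with
  | nil => intro acc; simp
  | cons p ps ih =>
    intro acc
    cases hp : pvFind grid p <;> simp [hp, ih]

lemma a_characterised (grid : List (List Int)) (usedpieces : List Int) :
    generatedatausedpieces grid usedpieces = usedpieces.filterMap (pvFind grid) := by
  unfold generatedatausedpieces
  have hfun : (fun (acc : List (List Int)) (usedpiece : Int) =>
      ((PySem.List.pyRange 0 11 1).foldl (fun (st : Bool × List (List Int)) i =>
        if st.1 then st
        else
          match (PySem.List.pyRange 0 5 1).foldl (fun (r : Option Int) j =>
            if r.isSome then r
            else if pvCell grid j i = usedpiece then some j else r) none with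
          | some j => (true, st.2 ++ [[i, j, 0]])
          | none => st) (false, acc)).2)
      = (fun (acc : List (List Int)) (p : Int) => acc ++ (pvFind grid p).toList) := by
    funext acc p
    simpa [pvFind] using a_outer grid p (PySem.List.pyRange 0 11 1) acc
  rw [hfun, a_eq_filterMap]
  simp

-- B's scan state invariant, inner (one column) level
lemma b_inner (grid : List (List Int)) (p i : Int) :
    ∀ (js : List Int) (R : PySem.Set Int) (d : PySem.Dict Int (List Int)),
      (p ∉ R →
        p ∉ (js.foldl (fun (st : PySem.Set Int × PySem.Dict Int (List Int)) j =>
          if st.1 = [] then st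
          else
            let v := pvCell grid j i
            if PySem.Set.contains st.1 v then (PySem.Set.discard st.1 v, st.2.insert v [i, j, 0])
            else st) (R, d)).1 ∧
        (js.foldl (fun (st : PySem.Set Int × PySem.Dict Int (List Int)) j =>
          if st.1 = [] then st
          else
            let v := pvCell grid j i
            if PySem.Set.contains st.1 v then (PySem.Set.discard st.1 v, st.2.insert v [i, j, 0])
            else st) (R, d)).2.get? p = d.get? p) ∧
      (p ∈ R → d.get? p = none →
        (js.foldl (fun (st : PySem.Set Int × PySem.Dict Int (List Int)) j =>
          if st.1 = [] then st
          else
            let v := pvCell grid j i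
            if PySem.Set.contains st.1 v then (PySem.Set.discard st.1 v, st.2.insert v [i, j, 0])
            else st) (R, d)).2.get? p = js.findSome? (fun j => if pvCell grid j i = p then some [i, j, 0] else none) ∧
        (p ∈ (js.foldl (fun (st : PySem.Set Int × PySem.Dict Int (List Int)) j =>
          if st.1 = [] then st
          else
            let v := pvCell grid j i
            if PySem.Set.contains st.1 v then (PySem.Set.discard st.1 v, st.2.insert v [i, j, 0])
            else st) (R, d)).1 ↔ js.findSome? (fun j => if pvCell grid j i = p then some [i, j, 0] else none) = none)) := by
  intro js
  induction js with
  | nil =>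
    intro R d
    exact ⟨fun h => ⟨h, rfl⟩, fun hp hd => ⟨hd, by simp [hp]⟩⟩
  | cons j js ih =>
    intro R d
    simp only [List.foldl_cons]
    by_cases hR : R = []
    · rw [if_pos hR]
      exact ⟨fun hp => (ih R d).1 hp, fun hp _ => absurd hp (by simp [hR])⟩
    · rw [if_neg hR]
      by_cases hc : PySem.Set.contains R (pvCell grid j i)
      · simp only [if_pos hc]
        have hmem : pvCell grid j i ∈ R := (PySem.Set.contains_iff R _).mp hc
        by_cases hv : pvCell grid j i = p
        · subst hv
          have hout : pvCell grid j i ∉ PySem.Set.discard R (pvCell grid j i) := by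
            rw [PySem.Set.mem_discard]; simp
          obtain ⟨hm, hg⟩ := (ih _ _).1 hout
          have hfc : (j :: js).findSome? (fun j' => if pvCell grid j' i = pvCell grid j i then some [i, j', 0] else none) = some [i, j, 0] := by
            simp
          refine ⟨fun hp => absurd hmem hp, fun _ _ => ⟨?_, ?_⟩⟩
          · rw [hfc, hg, PySem.Dict.get?_insert_self]
          · rw [hfc]
            exact iff_of_false hm (by simp)
        · constructor
          · intro hp
            have hout : p ∉ PySem.Set.discard R (pvCell grid j i) := by
              rw [PySem.Set.mem_discard]; exact fun h => hp h.1
            obtain ⟨hm, hg⟩ := (ih _ _).1 hout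
            refine ⟨hm, ?_⟩
            rw [hg, PySem.Dict.get?_insert_of_ne _ _ (fun h => hv h.symm)]
          · intro hp hd
            have hin : p ∈ PySem.Set.discard R (pvCell grid j i) := by
              rw [PySem.Set.mem_discard]; exact ⟨hp, fun h => hv h.symm⟩
            have hd' : (d.insert (pvCell grid j i) [i, j, 0]).get? p = none := by
              rw [PySem.Dict.get?_insert_of_ne _ _ (fun h => hv h.symm)]; exact hd
            obtain ⟨hg, hm⟩ := (ih _ _).2 hin hd'
            have hfc : (j :: js).findSome? (fun j => if pvCell grid j i = p then some [i, j, 0] else none) = js.findSome? (fun j => if pvCell grid j i = p then some [i, j, 0] else none) := by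
              simp [hv]
            rw [hfc]
            exact ⟨hg, hm⟩
      · simp only [if_neg hc]
        by_cases hv : pvCell grid j i = p
        · refine ⟨fun hp => (ih R d).1 hp, fun hp _ => ?_⟩
          exact absurd ((PySem.Set.contains_iff R _).mpr (hv ▸ hp)) hc
        · refine ⟨fun hp => (ih R d).1 hp, fun hp hd => ?_⟩
          obtain ⟨hg, hm⟩ := (ih R d).2 hp hd
          have hfc : (j :: js).findSome? (fun j => if pvCell grid j i = p then some [i, j, 0] else none) = js.findSome? (fun j => if pvCell grid j i = p then some [i, j, 0] else none) := by
            simp [hv]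
          rw [hfc]
          exact ⟨hg, hm⟩

-- B's scan state invariant, outer (whole grid) level
lemma b_outer (grid : List (List Int)) (p : Int) :
    ∀ (is : List Int) (R : PySem.Set Int) (d : PySem.Dict Int (List Int)),
      (p ∉ R →
        p ∉ (is.foldl (fun (st : PySem.Set Int × PySem.Dict Int (List Int)) i =>
          if st.1 = [] then st
          else (PySem.List.pyRange 0 5 1).foldl (fun (st : PySem.Set Int × PySem.Dict Int (List Int)) j =>
            if st.1 = [] then st
            else
              let v := pvCell grid j i
              if PySem.Set.contains st.1 v then (PySem.Set.discard st.1 v, st.2.insert v [i, j, 0])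
              else st) st) (R, d)).1 ∧
        (is.foldl (fun (st : PySem.Set Int × PySem.Dict Int (List Int)) i =>
          if st.1 = [] then st
          else (PySem.List.pyRange 0 5 1).foldl (fun (st : PySem.Set Int × PySem.Dict Int (List Int)) j =>
            if st.1 = [] then st
            else
              let v := pvCell grid j i
              if PySem.Set.contains st.1 v then (PySem.Set.discard st.1 v, st.2.insert v [i, j, 0])
              else st) st) (R, d)).2.get? p = d.get? p) ∧
      (p ∈ R → d.get? p = none →
        (is.foldl (fun (st : PySem.Set Int × PySem.Dict Int (List Int)) i =>
          if st.1 = [] then st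
          else (PySem.List.pyRange 0 5 1).foldl (fun (st : PySem.Set Int × PySem.Dict Int (List Int)) j =>
            if st.1 = [] then st
            else
              let v := pvCell grid j i
              if PySem.Set.contains st.1 v then (PySem.Set.discard st.1 v, st.2.insert v [i, j, 0])
              else st) st) (R, d)).2.get? p = is.findSome? (fun i => (PySem.List.pyRange 0 5 1).findSome? (fun j => if pvCell grid j i = p then some [i, j, 0] else none))) := by
  intro is
  induction is with
  | nil =>
    intro R d
    exact ⟨fun h => ⟨h, rfl⟩, fun _ hd => hd⟩
  | cons i is ih =>
    intro R d
    simp only [List.foldl_cons]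
    by_cases hR : R = []
    · rw [if_pos hR]
      exact ⟨fun hp => (ih R d).1 hp, fun hp _ => absurd hp (by simp [hR])⟩
    · rw [if_neg hR]
      constructor
      · intro hp
        obtain ⟨hm, hg⟩ := (b_inner grid p i (PySem.List.pyRange 0 5 1) R d).1 hp
        obtain ⟨hm2, hg2⟩ := (ih _ _).1 hm
        exact ⟨hm2, hg2.trans hg⟩
      · intro hp hd
        obtain ⟨hg, hmiff⟩ := (b_inner grid p i (PySem.List.pyRange 0 5 1) R d).2 hp hd
        cases hF : (PySem.List.pyRange 0 5 1).findSome? (fun j => if pvCell grid j i = p then some [i, j, 0] else none) with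
        | some c =>
          have hout : p ∉ _ := fun hin => absurd (hmiff.mp hin) (by simp [hF])
          obtain ⟨_, hg2⟩ := (ih _ _).1 hout
          have hfc : (i :: is).findSome? (fun i => (PySem.List.pyRange 0 5 1).findSome? (fun j => if pvCell grid j i = p then some [i, j, 0] else none)) = some c := by
            simp [hF]
          rw [hfc]
          exact (hg2.trans hg).trans hF
        | none =>
          have hin := hmiff.mpr hF
          have hd' := hg.trans hF
          have hfc : (i :: is).findSome? (fun i => (PySem.List.pyRange 0 5 1).findSome? (fun j => if pvCell grid j i = p then some [i, j, 0] else none)) = is.findSome? (fun i => (PySem.List.pyRange 0 5 1).findSome? (fun j => if pvCell grid j i = p then some [i, j, 0] else none)) := by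
            simp [hF]
          rw [hfc]
          exact (ih _ _).2 hin hd'

-- ===== VERDICT (by name: the statement is the Claim_ definition above) =====
theorem generatedatausedpieces_spec : Claim_equal_generatedatausedpieces := by
  intro grid usedpieces _ _
  unfold Spec_generatedatausedpieces generatedatausedpieces_alt
  rw [a_characterised]
  apply List.filterMap_congr
  intro p hp
  have hmem : p ∈ PySem.Set.ofList usedpieces := (PySem.Set.mem_ofList usedpieces p).mpr hp
  have := (b_outer grid p (PySem.List.pyRange 0 11 1)
      (PySem.Set.ofList usedpieces) PySem.Dict.empty).2 hmem (PySem.Dict.get?_empty p)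
  rw [this]
  rfl
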